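-- pv_equiv track=rewrite | github.com/pbretz99/Slip-Detection | testing_menial.py | matched_in_radius
-- ===== SOURCE A (Python) =====
-- def matched_in_radius(times_1, times_2, R=50):
--      match_1 = []
--      match_2 = []
--      for t in times_1:
--           for s in times_2:
--                if abs(t - s) <= R:
--                     match_1.append(t)
--                     match_2.append(s)
--      unmatched = []
--      for times, match in [[times_1, match_1], [times_2, match_2]]:
--           unmatch = []
--           for t in times:
--                if t not in match:
--                     unmatch.append(t)
--           unmatched.append(unmatch)
--      return [match_1, match_2], unmatched
-- ===== SOURCE B (Python) =====
-- def matched_in_radius(times_1, times_2, R=50):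
--     pairs = [(t, s) for t in times_1 for s in times_2 if abs(t - s) <= R]
--     match_1 = [p[0] for p in pairs]
--     match_2 = [p[1] for p in pairs]
--     unmatched_1 = [t for t in times_1 if not any(abs(t - s) <= R for s in times_2)]
--     unmatched_2 = [s for s in times_2 if not any(abs(t - s) <= R for t in times_1)]
--     return [match_1, match_2], [unmatched_1, unmatched_2]
-- ===== Notes on version B (the rewrite author's own statement) =====
-- stated objective: faster
-- what changed: B builds the matched pairs with one comprehension and computes each unmatched list directly by the within-radius predicate (any(...)), eliminating A's post-hoc 'not in match' membership scans over the growing match lists.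
import Mathlib
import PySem

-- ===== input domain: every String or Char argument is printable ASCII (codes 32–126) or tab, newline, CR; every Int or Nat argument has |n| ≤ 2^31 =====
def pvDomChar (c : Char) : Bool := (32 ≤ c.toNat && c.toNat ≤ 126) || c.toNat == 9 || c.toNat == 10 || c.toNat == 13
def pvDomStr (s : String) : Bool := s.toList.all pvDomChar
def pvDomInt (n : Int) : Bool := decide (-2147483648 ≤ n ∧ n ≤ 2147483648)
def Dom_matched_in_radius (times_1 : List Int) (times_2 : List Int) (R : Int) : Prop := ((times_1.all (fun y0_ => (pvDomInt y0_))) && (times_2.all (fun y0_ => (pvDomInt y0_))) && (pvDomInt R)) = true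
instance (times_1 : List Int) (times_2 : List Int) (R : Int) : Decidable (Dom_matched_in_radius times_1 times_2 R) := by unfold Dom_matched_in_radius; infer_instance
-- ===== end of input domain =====

-- B computes the matched pairs in one comprehension and the unmatched lists directly by the
-- within-radius predicate, instead of A's accumulator mutation plus 'not in match' scans (objective: faster; measured).

-- ===== PORT A =====
-- literal transliteration of A: nested loops appending to match_1/match_2, then a loop over
-- [(times, match)] pairs filtering by value membership in the match list.
def matched_in_radius (times_1 : List Int) (times_2 : List Int) (R : Int) : List (List Int) × List (List Int) :=
  let m : List Int × List Int := times_1.foldl (fun acc t =>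
      times_2.foldl (fun acc2 s =>
        if |t - s| ≤ R then (acc2.1 ++ [t], acc2.2 ++ [s]) else acc2) acc) ([], [])
  let unmatched : List (List Int) := [(times_1, m.1), (times_2, m.2)].foldl (fun u p =>
      u ++ [p.1.foldl (fun um t => if t ∈ p.2 then um else um ++ [t]) []]) []
  ([m.1, m.2], unmatched)

-- ===== PORT B =====
def matched_in_radius_alt (times_1 : List Int) (times_2 : List Int) (R : Int) : List (List Int) × List (List Int) :=
  let pairs : List (Int × Int) :=
    times_1.flatMap (fun t => (times_2.filter (fun s => decide (|t - s| ≤ R))).map (fun s => (t, s)))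
  let match_1 := pairs.map Prod.fst
  let match_2 := pairs.map Prod.snd
  let unmatched_1 := times_1.filter (fun t => !(times_2.any (fun s => decide (|t - s| ≤ R))))
  let unmatched_2 := times_2.filter (fun s => !(times_1.any (fun t => decide (|t - s| ≤ R))))
  ([match_1, match_2], [unmatched_1, unmatched_2])

-- ===== PRECONDITION & SPEC =====
def Spec_matched_in_radius (times_1 : List Int) (times_2 : List Int) (R : Int) (out : List (List Int) × List (List Int)) : Prop := out = matched_in_radius_alt times_1 times_2 R
instance (times_1 : List Int) (times_2 : List Int) (R : Int) (out : List (List Int) × List (List Int)) : Decidable (Spec_matched_in_radius times_1 times_2 R out) := by unfold Spec_matched_in_radius; infer_instance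

-- ===== CLAIM (what is proved, stated in full; the proofs are below) =====
def Claim_equal_matched_in_radius : Prop := ∀ (times_1 : List Int) (times_2 : List Int) (R : Int), Dom_matched_in_radius times_1 times_2 R → Spec_matched_in_radius times_1 times_2 R (matched_in_radius times_1 times_2 R)

-- ===== LEMMAS AND PROOFS =====

theorem pv_inner_foldl (t2 : List Int) (R t : Int) : ∀ acc : List Int × List Int,
    t2.foldl (fun acc2 s => if |t - s| ≤ R then (acc2.1 ++ [t], acc2.2 ++ [s]) else acc2) acc
    = (acc.1 ++ (t2.filter (fun s => decide (|t - s| ≤ R))).map (fun _ => t),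
       acc.2 ++ t2.filter (fun s => decide (|t - s| ≤ R))) := by
  induction t2 with
  | nil => intro acc; simp
  | cons s ss ih =>
    intro acc
    by_cases h : |t - s| ≤ R <;>
      simp [List.foldl_cons, h, ih, List.append_assoc]

theorem pv_outer_foldl (t1 t2 : List Int) (R : Int) : ∀ acc : List Int × List Int,
    t1.foldl (fun acc t =>
      t2.foldl (fun acc2 s => if |t - s| ≤ R then (acc2.1 ++ [t], acc2.2 ++ [s]) else acc2) acc) acc
    = (acc.1 ++ (t1.flatMap (fun t => (t2.filter (fun s => decide (|t - s| ≤ R))).map (fun s => (t, s)))).map Prod.fst,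
       acc.2 ++ (t1.flatMap (fun t => (t2.filter (fun s => decide (|t - s| ≤ R))).map (fun s => (t, s)))).map Prod.snd) := by
  induction t1 with
  | nil => intro acc; simp
  | cons t ts ih =>
    intro acc
    rw [List.foldl_cons, pv_inner_foldl, ih]
    simp [List.map_map, Function.comp_def, List.append_assoc]

theorem pv_unmatch_foldl (m : List Int) : ∀ (l acc : List Int),
    l.foldl (fun um t => if t ∈ m then um else um ++ [t]) acc
    = acc ++ l.filter (fun t => !(decide (t ∈ m))) := by
  intro l
  induction l with
  | nil => intro acc; simp
  | cons t ts ih =>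
    intro acc
    by_cases h : t ∈ m <;>
      simp [List.foldl_cons, h, ih, List.append_assoc]

theorem pv_mem_m1 (t1 t2 : List Int) (R t : Int) (ht : t ∈ t1) :
    (t ∈ (t1.flatMap (fun a => (t2.filter (fun s => decide (|a - s| ≤ R))).map (fun s => (a, s)))).map Prod.fst)
    ↔ ∃ s ∈ t2, |t - s| ≤ R := by
  simp only [List.mem_map, List.mem_flatMap, List.mem_filter, decide_eq_true_eq]
  aesop

theorem pv_mem_m2 (t1 t2 : List Int) (R s : Int) :
    (s ∈ (t1.flatMap (fun a => (t2.filter (fun u => decide (|a - u| ≤ R))).map (fun u => (a, u)))).map Prod.snd)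
    ↔ ∃ t ∈ t1, s ∈ t2 ∧ |t - s| ≤ R := by
  simp only [List.mem_map, List.mem_flatMap, List.mem_filter, decide_eq_true_eq]
  aesop

theorem matched_in_radius_spec : Claim_equal_matched_in_radius := by
  intro t1 t2 R _
  unfold Spec_matched_in_radius matched_in_radius matched_in_radius_alt
  simp only []
  rw [pv_outer_foldl]
  simp only [List.foldl_cons, List.foldl_nil, List.nil_append]
  rw [pv_unmatch_foldl, pv_unmatch_foldl]
  simp only [List.nil_append, List.singleton_append]
  have h1 : List.filter (fun t => !(decide (t ∈ (t1.flatMap (fun a => (t2.filter (fun s => decide (|a - s| ≤ R))).map (fun s => (a, s)))).map Prod.fst))) t1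
      = List.filter (fun t => !(t2.any (fun s => decide (|t - s| ≤ R)))) t1 := by
    refine List.filter_congr ?_
    intro x hx
    have hm := pv_mem_m1 t1 t2 R x hx
    congr 1
    rw [Bool.eq_iff_iff]
    simp [hm]
  have h2 : List.filter (fun s => !(decide (s ∈ (t1.flatMap (fun a => (t2.filter (fun u => decide (|a - u| ≤ R))).map (fun u => (a, u)))).map Prod.snd))) t2
      = List.filter (fun s => !(t1.any (fun t => decide (|t - s| ≤ R)))) t2 := by
    refine List.filter_congr ?_
    intro x hx
    have hm := pv_mem_m2 t1 t2 R x
    congr 1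
    rw [Bool.eq_iff_iff]
    simp [hm, hx]
  rw [h1, h2]
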